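-- pv_equiv track=rewrite | github.com/greenstar1151/Baekjoon | 20312_CPU 벤치마킹/20312_CPU 벤치마킹_250917.py | solution
-- ===== SOURCE A (Python) =====
-- MODULO = 10**9 + 7
--
-- def solution(perf_multiples: tuple[int, ...]):
--     prev_row_sum = 0
--     total_sum = 0
--     for m in perf_multiples[::-1]:
--         prev_row_sum = m * (prev_row_sum + 1)
--         prev_row_sum %= MODULO
--         total_sum += prev_row_sum
--         total_sum %= MODULO
--
--     return total_sum
-- ===== SOURCE B (Python) =====
-- MODULO = 10**9 + 7
--
-- def solution(perf_multiples):
--     # Sum of products of all contiguous subarrays, enumerated explicitly: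
--     # for each suffix, add every prefix product of that suffix.
--     total = 0
--     suffix = list(perf_multiples)
--     while suffix:
--         p = 1
--         for m in suffix:
--             p = p * m % MODULO
--             total = (total + p) % MODULO
--         suffix = suffix[1:]
--     return total
-- ===== Notes on version B (the rewrite author's own statement) =====
-- stated objective: alternative
-- what changed: Replaces A's O(n) reverse-fold recurrence (prev_row_sum = m*(prev_row_sum+1)) with an explicit O(n^2) enumeration of all contiguous subarrays: for each suffix a running prefix product is accumulated into the total, mod at every step.
import Mathlib
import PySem

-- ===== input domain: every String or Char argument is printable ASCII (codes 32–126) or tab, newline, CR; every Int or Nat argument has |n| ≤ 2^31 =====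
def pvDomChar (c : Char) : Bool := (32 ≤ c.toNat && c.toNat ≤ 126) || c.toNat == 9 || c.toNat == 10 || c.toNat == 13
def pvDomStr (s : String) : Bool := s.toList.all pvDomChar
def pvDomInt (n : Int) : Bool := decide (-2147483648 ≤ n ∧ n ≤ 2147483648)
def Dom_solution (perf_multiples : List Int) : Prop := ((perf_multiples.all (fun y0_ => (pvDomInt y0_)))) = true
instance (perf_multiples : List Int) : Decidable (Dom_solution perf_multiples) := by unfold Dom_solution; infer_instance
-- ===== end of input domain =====

-- B replaces A's O(n) reverse-fold recurrence by an explicit enumeration of all contiguous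
-- subarray products (alternative decomposition, not faster); return values proved equal.

-- ===== PORT A =====
-- step of A's loop body: prev_row_sum = m*(prev_row_sum+1) % MOD; total = (total+prev) % MOD
def pvStepA (st : Int × Int) (m : Int) : Int × Int :=
  let p := PySem.Int.mod (m * (st.1 + 1)) 1000000007
  (p, PySem.Int.mod (st.2 + p) 1000000007)

def solution (perf_multiples : List Int) : Int :=
  -- perf_multiples[::-1] is PySem.List.slice? … (-1) (never none since step ≠ 0)
  (((PySem.List.slice? perf_multiples none none (-1)).getD []).foldl pvStepA (0, 0)).2

-- ===== PORT B =====
-- inner loop body of B: p = p*m % MOD; total = (total+p) % MOD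
def pvRowStep (st : Int × Int) (m : Int) : Int × Int :=
  let p := PySem.Int.mod (st.1 * m) 1000000007
  (p, PySem.Int.mod (st.2 + p) 1000000007)

def pvRow (s : List Int) (st : Int × Int) : Int × Int := s.foldl pvRowStep st

-- B's while loop over suffixes (suffix[1:] is the tail, PySem.List.slice_from_one)
def pvOuter : List Int → Int → Int
  | [], total => total
  | m :: rest, total => pvOuter rest ((pvRow (m :: rest) (1, total)).2)

def solution_alt (perf_multiples : List Int) : Int := pvOuter perf_multiples 0

-- ===== PRECONDITION & SPEC =====
def Spec_solution (perf_multiples : List Int) (out : Int) : Prop := out = solution_alt perf_multiples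
instance (perf_multiples : List Int) (out : Int) : Decidable (Spec_solution perf_multiples out) := by unfold Spec_solution; infer_instance

-- ===== CLAIM (what is proved, stated in full; the proofs are below) =====
def Claim_equal_solution : Prop := ∀ (perf_multiples : List Int), Dom_solution perf_multiples → Spec_solution perf_multiples (solution perf_multiples)

-- ===== LEMMAS AND PROOFS =====

-- sum of products of the nonempty prefixes of l
def pvR : List Int → Int
  | [] => 0
  | a :: t => a * (1 + pvR t)

-- sum of products of all nonempty contiguous subarrays of l
def pvT : List Int → Int
  | [] => 0
  | a :: t => a * (1 + pvR t) + pvT t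

theorem pvmod_eq (x : Int) : PySem.Int.mod x 1000000007 = x % 1000000007 :=
  PySem.Int.mod_eq_emod_of_pos (by norm_num)

theorem pv_mul_reduce (a x : Int) :
    (a * (x % 1000000007 + 1)) % 1000000007 = (a * (x + 1)) % 1000000007 := by
  conv_lhs => rw [Int.mul_emod, Int.add_emod, Int.emod_emod_of_dvd _ dvd_rfl,
    ← Int.add_emod, ← Int.mul_emod]

theorem pv_mul_reduce' (P a : Int) :
    (P % 1000000007 * a) % 1000000007 = (P * a) % 1000000007 := by
  conv_lhs => rw [Int.mul_emod, Int.emod_emod_of_dvd _ dvd_rfl, ← Int.mul_emod]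

theorem pv_add_reduce (x y : Int) :
    (x % 1000000007 + y % 1000000007) % 1000000007 = (x + y) % 1000000007 :=
  (Int.add_emod x y 1000000007).symm

-- A's fold over the reversed list, seen as a foldr over the original list
theorem a_state (l : List Int) :
    l.foldr (fun m st => pvStepA st m) (0, 0) = (pvR l % 1000000007, pvT l % 1000000007) := by
  induction l with
  | nil => simp [pvR, pvT]
  | cons a t ih =>
    rw [List.foldr_cons, ih]
    simp only [pvStepA, pvmod_eq, pvR, pvT]
    have h1 : (a * (pvR t % 1000000007 + 1)) % 1000000007
        = (a * (1 + pvR t)) % 1000000007 := by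
      rw [pv_mul_reduce]; ring_nf
    rw [h1]
    refine Prod.ext rfl ?_
    show (pvT t % 1000000007 + (a * (1 + pvR t)) % 1000000007) % 1000000007
        = (a * (1 + pvR t) + pvT t) % 1000000007
    rw [pv_add_reduce]; ring_nf

-- B's inner row fold
theorem row_eq (s : List Int) : ∀ P Q : Int,
    pvRow s (P % 1000000007, Q % 1000000007)
      = ((P * s.prod) % 1000000007, (Q + P * pvR s) % 1000000007) := by
  induction s with
  | nil => intro P Q; simp [pvRow, pvR]
  | cons a s' ih =>
    intro P Q
    show pvRow s' (pvRowStep (P % 1000000007, Q % 1000000007) a) = _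
    have hstep : pvRowStep (P % 1000000007, Q % 1000000007) a
        = ((P * a) % 1000000007, ((Q + P * a) % 1000000007)) := by
      simp only [pvRowStep, pvmod_eq, pv_mul_reduce']
      rw [pv_add_reduce]
    rw [hstep, ih (P * a) (Q + P * a)]
    refine Prod.ext ?_ ?_
    · show (P * a * s'.prod) % 1000000007 = (P * (a :: s').prod) % 1000000007
      rw [List.prod_cons]; ring_nf
    · show (Q + P * a + P * a * pvR s') % 1000000007 = (Q + P * pvR (a :: s')) % 1000000007
      simp only [pvR]; ring_nf

-- B's outer loop over suffixes
theorem outer_eq (l : List Int) : ∀ Q : Int,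
    pvOuter l (Q % 1000000007) = (Q + pvT l) % 1000000007 := by
  induction l with
  | nil => intro Q; simp [pvOuter, pvT]
  | cons a s ih =>
    intro Q
    have h1 : (1 : Int) = 1 % 1000000007 := by decide
    show pvOuter s ((pvRow (a :: s) (1, Q % 1000000007)).2) = _
    rw [h1, row_eq (a :: s) 1 Q]
    simp only []
    rw [ih (Q + 1 * pvR (a :: s))]
    show (Q + 1 * pvR (a :: s) + pvT s) % 1000000007 = (Q + pvT (a :: s)) % 1000000007
    simp only [pvR, pvT]; ring_nf

-- ===== VERDICT (by name: the statement is the Claim_ definition above) =====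
theorem solution_spec : Claim_equal_solution := by
  intro l _
  show solution l = solution_alt l
  have hA : solution l = pvT l % 1000000007 := by
    unfold solution
    rw [PySem.List.slice?_none_none_neg_one]
    simp only [Option.getD_some, List.foldl_reverse, a_state]
  have hB : solution_alt l = pvT l % 1000000007 := by
    unfold solution_alt
    have h0 : (0 : Int) = 0 % 1000000007 := by decide
    rw [h0, outer_eq l 0, zero_add]
  rw [hA, hB]
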